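-- pv_equiv track=rewrite | github.com/mdbruffey/adventofcode | 2015/Day-01/solve.py | part2
-- ===== SOURCE A (Python) =====
-- def part2(data):
--     floor = 0
--     for i, char in enumerate(data):
--         if char == "(":
--             floor += 1
--         else:
--             floor -= 1
--         if floor < 0:
--             return i+1
--
--     return 0
-- ===== SOURCE B (Python) =====
-- def part2(data):
--     # Pass 1: build the full table of cumulative floor values.
--     prefixes = []
--     total = 0
--     for c in data:
--         total += 1 if c == "(" else -1
--         prefixes.append(total)
--     # Pass 2: find the first position at which the floor is negative.
--     for i, f in enumerate(prefixes):
--         if f < 0: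
--             return i + 1
--     return 0
-- ===== Notes on version B (the rewrite author's own statement) =====
-- stated objective: alternative
-- what changed: B separates accumulation from detection: one pass builds the full list of cumulative floor values, a second pass scans that table for the first negative entry, instead of A's single fused early-exit loop.
import Mathlib
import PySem

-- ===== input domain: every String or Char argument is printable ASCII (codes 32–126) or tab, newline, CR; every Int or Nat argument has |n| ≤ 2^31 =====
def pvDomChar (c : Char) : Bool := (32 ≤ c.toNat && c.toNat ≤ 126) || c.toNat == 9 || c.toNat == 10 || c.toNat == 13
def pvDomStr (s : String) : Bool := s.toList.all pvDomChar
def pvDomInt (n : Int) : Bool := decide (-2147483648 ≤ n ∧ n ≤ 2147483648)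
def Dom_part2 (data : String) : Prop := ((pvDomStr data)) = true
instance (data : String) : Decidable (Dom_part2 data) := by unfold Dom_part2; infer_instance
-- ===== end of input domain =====

-- B separates accumulation (a prefix-sum table) from detection (a scan for the first negative entry); A fuses both in one early-exit loop. Same O(n) cost.

-- ===== PORT A =====
-- fused loop: update floor, return i+1 as soon as it goes negative
def part2Loop (chars : List Char) (floor : Int) (i : Int) : Int :=
  match chars with
  | [] => 0
  | c :: rest =>
    let floor' := if c = '(' then floor + 1 else floor - 1
    if floor' < 0 then i + 1 else part2Loop rest floor' (i + 1)

def part2 (data : String) : Int := part2Loop data.toList 0 0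

-- ===== PORT B =====
-- pass 1 of Source B: the table of cumulative floor values
def part2Prefixes (chars : List Char) (total : Int) : List Int :=
  match chars with
  | [] => []
  | c :: rest =>
    let total' := total + (if c = '(' then 1 else -1)
    total' :: part2Prefixes rest total'

-- pass 2 of Source B: first index (plus one) whose table entry is negative, else 0
def part2FindNeg (prefixes : List Int) (i : Int) : Int :=
  match prefixes with
  | [] => 0
  | f :: rest => if f < 0 then i + 1 else part2FindNeg rest (i + 1)

def part2_alt (data : String) : Int := part2FindNeg (part2Prefixes data.toList 0) 0

-- ===== PRECONDITION & SPEC =====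
def Spec_part2 (data : String) (out : Int) : Prop := out = part2_alt data
instance (data : String) (out : Int) : Decidable (Spec_part2 data out) := by unfold Spec_part2; infer_instance

-- ===== CLAIM (what is proved, stated in full; the proofs are below) =====
def Claim_equal_part2 : Prop := ∀ (data : String), Dom_part2 data → Spec_part2 data (part2 data)

-- ===== LEMMAS AND PROOFS =====
theorem part2Loop_eq_findNeg_prefixes (chars : List Char) (floor i : Int) :
    part2Loop chars floor i = part2FindNeg (part2Prefixes chars floor) i := by
  induction chars generalizing floor i with
  | nil => rfl
  | cons c rest ih =>
    simp only [part2Loop, part2Prefixes, part2FindNeg]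
    by_cases h : c = '('
    · simp [h, ih]
    · simp only [h, if_false]
      have : floor - 1 = floor + (-1) := by ring
      rw [this, ih]

-- ===== VERDICT (by name: the statement is the Claim_ definition above) =====
theorem part2_spec : Claim_equal_part2 := by
  intro data _
  unfold Spec_part2 part2 part2_alt
  exact part2Loop_eq_findNeg_prefixes _ _ _
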